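-- pv_equiv track=rewrite | github.com/ODZ-UJF-AV-CR/Strip_detector | Jupyter_scripts/ph32lib.py | find_hit_in_layer
-- ===== SOURCE A (Python) =====
-- def find_hit_in_layer(m1_data, m2_data):
--     zero_detected = False
--     hit_detected = False
--     hit_index = -1
--
--     for i in range(len(m1_data)):
--         if m1_data[i] == 0 or m1_data[i] == -1:
--             zero_detected = True
--         if m1_data[i] > 0 and m1_data[i] < 65535:
--             #Check for a gap between hits (invalid configuration)
--             if (hit_detected == True) and (zero_detected == True):
--                 return -1
--             hit_detected = True
--             zero_detected = False
--             hit_index = i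
--
--     #simulate a gap (zero) between chips
--     zero_detected = True
--
--     for i in range(len(m2_data)):
--         if m2_data[i] == 0 or m2_data[i] == -1:
--             zero_detected = True
--         if m2_data[i] > 0 and m2_data[i] < 65535:
--             #Check for a gap between hits (invalid configuration)
--             if (hit_detected == True) and (zero_detected == True):
--                 return -1
--             hit_detected = True
--             zero_detected = False
--             hit_index = i + 32
--
--     return hit_index
-- ===== SOURCE B (Python) =====
-- def find_hit_in_layer(m1_data, m2_data):
--     # Declarative re-formulation: build one (value, index) stream with a sentinel
--     # gap between layers, keep only gap/hit elements, count group starts by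
--     # zipping with the previous-flag list, then pick the last hit index.
--     stream = [(v, i) for i, v in enumerate(m1_data)] \
--              + [(0, -1)] \
--              + [(v, i + 32) for i, v in enumerate(m2_data)]
--     marks = [(0 < v < 65535, i) for v, i in stream
--              if v == 0 or v == -1 or 0 < v < 65535]
--     prevs = [False] + [h for h, _ in marks[:-1]]
--     starts = sum(1 for (h, _), p in zip(marks, prevs) if h and not p)
--     if starts != 1:
--         return -1
--     hits = [i for h, i in marks if h]
--     return hits[-1]
-- ===== Notes on version B (the rewrite author's own statement) =====
-- stated objective: alternative
-- what changed: Replaces A's two early-returning loops over mutable zero/hit flags with a declarative pipeline: build one combined (value, index) stream with a sentinel gap between layers, filter it to gap/hit marks, count group starts by zipping each mark with its predecessor's flag, and return the last hit index iff exactly one group exists.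
import Mathlib
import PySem

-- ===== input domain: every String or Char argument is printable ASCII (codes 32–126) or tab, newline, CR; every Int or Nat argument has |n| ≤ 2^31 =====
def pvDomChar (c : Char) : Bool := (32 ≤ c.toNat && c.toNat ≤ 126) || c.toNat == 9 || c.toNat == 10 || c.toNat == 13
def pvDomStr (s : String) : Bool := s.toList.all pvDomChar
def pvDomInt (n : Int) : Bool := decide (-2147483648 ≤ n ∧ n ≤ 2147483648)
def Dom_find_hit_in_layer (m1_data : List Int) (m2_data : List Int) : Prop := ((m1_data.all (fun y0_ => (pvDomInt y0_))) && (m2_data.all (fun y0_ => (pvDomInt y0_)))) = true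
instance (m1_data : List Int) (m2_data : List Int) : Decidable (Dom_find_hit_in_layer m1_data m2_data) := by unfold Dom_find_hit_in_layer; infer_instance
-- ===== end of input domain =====

-- B computes the result declaratively (filter/zip/count over one combined (value, index) stream)
-- instead of A's early-returning two-loop state machine; objective: alternative decomposition, no speed claim.

-- ===== PORT A =====
-- A's per-layer loop: state (zero_detected, hit_detected, hit_index); `none` = early `return -1`.
-- `i` is Python's loop counter, `off` the constant added to the stored hit index (0 resp. 32).
def fhilLoopA (data : List Int) (i : Int) (zd hd : Bool) (hi : Int) (off : Int) :
    Option (Bool × Bool × Int) :=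
  match data with
  | [] => some (zd, hd, hi)
  | v :: rest =>
      let zd' := if v = 0 ∨ v = -1 then true else zd
      if 0 < v ∧ v < 65535 then
        if hd = true ∧ zd' = true then none
        else fhilLoopA rest (i + 1) false true (i + off) off
      else fhilLoopA rest (i + 1) zd' hd hi off

def find_hit_in_layer (m1_data : List Int) (m2_data : List Int) : Int :=
  match fhilLoopA m1_data 0 false false (-1) 0 with
  | none => -1
  | some (_, hd, hi) =>
      -- "simulate a gap (zero) between chips": zero_detected = True
      match fhilLoopA m2_data 0 true hd hi 32 with
      | none => -1
      | some (_, _, hi') => hi'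

-- ===== PORT B =====
def find_hit_in_layer_alt (m1_data : List Int) (m2_data : List Int) : Int :=
  let stream : List (Int × Int) :=
    ((PySem.List.enumerate m1_data).map (fun p => (p.2, p.1)))
      ++ [((0 : Int), (-1 : Int))]
      ++ ((PySem.List.enumerate m2_data).map (fun p => (p.2, p.1 + 32)))
  let marks : List (Bool × Int) :=
    (stream.filter (fun p => decide (p.1 = 0 ∨ p.1 = -1 ∨ (0 < p.1 ∧ p.1 < 65535)))).map
      (fun p => (decide (0 < p.1 ∧ p.1 < 65535), p.2))
  -- prevs = [False] + [h for h, _ in marks[:-1]]   (marks[:-1] = dropLast)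
  let prevs : List Bool := false :: (marks.dropLast.map Prod.fst)
  -- sum(1 for (h, _), p in zip(marks, prevs) if h and not p)
  let starts : Nat := (marks.zip prevs).countP (fun x => x.1.1 && !x.2)
  if starts ≠ 1 then -1
  else
    let hits : List Int := (marks.filter Prod.fst).map Prod.snd
    (hits.getLast?).getD (-1)   -- hits[-1]; nonempty here since starts = 1

-- ===== PRECONDITION & SPEC =====
def Spec_find_hit_in_layer (m1_data : List Int) (m2_data : List Int) (out : Int) : Prop := out = find_hit_in_layer_alt m1_data m2_data
instance (m1_data : List Int) (m2_data : List Int) (out : Int) : Decidable (Spec_find_hit_in_layer m1_data m2_data out) := by unfold Spec_find_hit_in_layer; infer_instance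

-- ===== CLAIM (what is proved, stated in full; the proofs are below) =====
def Claim_equal_find_hit_in_layer : Prop := ∀ (m1_data : List Int) (m2_data : List Int), Dom_find_hit_in_layer m1_data m2_data → Spec_find_hit_in_layer m1_data m2_data (find_hit_in_layer m1_data m2_data)

-- ===== LEMMAS AND PROOFS =====

-- Abstract mark stream: (isHit, index) for each gap/hit element, neither-values dropped.
def marksOf : List Int → Int → List (Bool × Int)
  | [], _ => []
  | v :: r, j =>
      if 0 < v ∧ v < 65535 then (true, j) :: marksOf r (j + 1)
      else if v = 0 ∨ v = -1 then (false, j) :: marksOf r (j + 1)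
      else marksOf r (j + 1)

-- B's filter+map, as a function of the raw (value, index) stream
def toMarks (s : List (Int × Int)) : List (Bool × Int) :=
  (s.filter (fun p => decide (p.1 = 0 ∨ p.1 = -1 ∨ (0 < p.1 ∧ p.1 < 65535)))).map
    (fun p => (decide (0 < p.1 ∧ p.1 < 65535), p.2))

-- A's state machine, run on the mark stream.
def mLoop : List (Bool × Int) → Bool → Bool → Int → Option (Bool × Bool × Int)
  | [], zd, hd, hi => some (zd, hd, hi)
  | (true, j) :: r, zd, hd, _ => if hd = true ∧ zd = true then none else mLoop r false true j
  | (false, _) :: r, _, hd, hi' => mLoop r true hd hi'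

def resOf : Option (Bool × Bool × Int) → Int
  | none => -1
  | some (_, _, hi) => hi

-- number of group starts, given the previous element's hit flag
def startsR : List (Bool × Int) → Bool → Nat
  | [], _ => 0
  | (h, _) :: r, p => (if h && !p then 1 else 0) + startsR r h

def lastHitD (ms : List (Bool × Int)) (d : Int) : Int :=
  ((ms.filter Prod.fst).map Prod.snd).getLastD d

theorem lastHitD_cons_true (j : Int) (r : List (Bool × Int)) (d : Int) :
    lastHitD ((true, j) :: r) d = lastHitD r j := by
  unfold lastHitD
  rw [List.filter_cons_of_pos (by simp), List.map_cons, List.getLastD_cons]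

theorem lastHitD_cons_false (j : Int) (r : List (Bool × Int)) (d : Int) :
    lastHitD ((false, j) :: r) d = lastHitD r d := by
  simp [lastHitD]

theorem fhilLoopA_eq_mLoop (data : List Int) (i : Int) (zd hd : Bool) (hi off : Int) :
    fhilLoopA data i zd hd hi off = mLoop (marksOf data (i + off)) zd hd hi := by
  induction data generalizing i zd hd hi with
  | nil => simp [fhilLoopA, marksOf, mLoop]
  | cons v rest ih =>
    by_cases hv : 0 < v ∧ v < 65535
    · have hng : ¬ (v = 0 ∨ v = -1) := by omega
      simp only [fhilLoopA, marksOf, if_pos hv, if_neg hng, mLoop]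
      split
      · rfl
      · rw [ih]; ring_nf
    · by_cases hg : v = 0 ∨ v = -1
      · simp only [fhilLoopA, marksOf, if_neg hv, if_pos hg, mLoop]
        rw [ih]; ring_nf
      · simp only [fhilLoopA, marksOf, if_neg hv, if_neg hg]
        rw [ih]; ring_nf

theorem mLoop_append (a b : List (Bool × Int)) (zd hd : Bool) (hi : Int) :
    mLoop (a ++ b) zd hd hi =
      match mLoop a zd hd hi with
      | none => none
      | some (z, h, i) => mLoop b z h i := by
  induction a generalizing zd hd hi with
  | nil => simp [mLoop]
  | cons x r ih =>
    obtain ⟨h, j⟩ := x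
    cases h
    · simp only [List.cons_append, mLoop, ih]
    · simp only [List.cons_append, mLoop]
      split
      · rfl
      · rw [ih]

theorem mLoop_armed (ms : List (Bool × Int)) (hi : Int) :
    mLoop ms true true hi = if ms.any Prod.fst then none else some (true, true, hi) := by
  induction ms generalizing hi with
  | nil => simp [mLoop]
  | cons x r ih =>
    obtain ⟨h, j⟩ := x
    cases h
    · cases hr : r.any Prod.fst <;> simp [mLoop, ih, hr]
    · simp [mLoop]

theorem starts_false_zero_iff (ms : List (Bool × Int)) :
    startsR ms false = 0 ↔ ms.any Prod.fst = false := by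
  induction ms with
  | nil => simp [startsR]
  | cons x r ih =>
    obtain ⟨h, j⟩ := x
    cases h
    · simpa [startsR] using ih
    · simp [startsR]

theorem lastHitD_of_no_hit (ms : List (Bool × Int)) (d : Int) (h : ms.any Prod.fst = false) :
    lastHitD ms d = d := by
  unfold lastHitD
  rw [List.filter_eq_nil_iff.mpr (by intro x hx; simpa using (List.any_eq_false.mp h) x hx)]
  rfl

theorem mLoop_ingroup (ms : List (Bool × Int)) (hi : Int) :
    (startsR ms true = 0 → ∃ z, mLoop ms false true hi = some (z, true, lastHitD ms hi)) ∧
    (startsR ms true ≠ 0 → mLoop ms false true hi = none) := by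
  induction ms generalizing hi with
  | nil => exact ⟨fun _ => ⟨false, by simp [mLoop, lastHitD]⟩, fun h => absurd rfl h⟩
  | cons x r ih =>
    obtain ⟨h, j⟩ := x
    cases h
    · -- gap: go armed
      simp only [mLoop, startsR, lastHitD_cons_false]
      rw [mLoop_armed]
      constructor
      · intro h0
        have hz : startsR r false = 0 := by simpa [startsR] using h0
        have hany : r.any Prod.fst = false := (starts_false_zero_iff r).mp hz
        rw [hany, lastHitD_of_no_hit r hi hany]
        exact ⟨true, by simp⟩
      · intro h0
        have hz : startsR r false ≠ 0 := by simpa [startsR] using h0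
        have hany : r.any Prod.fst = true := by
          cases hr : r.any Prod.fst
          · exact absurd ((starts_false_zero_iff r).mpr hr) hz
          · rfl
        rw [hany]; rfl
    · -- hit: stay in the group, hit_index := j
      simp only [mLoop, startsR, lastHitD_cons_true]
      simpa using ih j

theorem mLoop_fresh (ms : List (Bool × Int)) (zd : Bool) (hi : Int) :
    (startsR ms false = 0 → ∃ z, mLoop ms zd false hi = some (z, false, hi)) ∧
    (startsR ms false = 1 → ∃ z, mLoop ms zd false hi = some (z, true, lastHitD ms hi)) ∧
    (2 ≤ startsR ms false → mLoop ms zd false hi = none) := by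
  induction ms generalizing zd hi with
  | nil =>
    refine ⟨fun _ => ⟨zd, rfl⟩, fun h => by simp [startsR] at h, fun h => by simp [startsR] at h⟩
  | cons x r ih =>
    obtain ⟨h, j⟩ := x
    cases h
    · -- gap
      simp only [mLoop, startsR, lastHitD_cons_false]
      simpa [startsR] using ih true hi
    · -- first hit: enter the group
      simp only [mLoop, startsR, lastHitD_cons_true]
      have hni : ¬ (false = true ∧ zd = true) := by simp
      rw [if_neg hni]
      refine ⟨fun h0 => by simp at h0, ?_, ?_⟩
      · intro h1
        have hz : startsR r true = 0 := by simp at h1; omega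
        simpa [hz] using (mLoop_ingroup r j).1 hz
      · intro h2
        have hz : startsR r true ≠ 0 := by simp at h2; omega
        exact (mLoop_ingroup r j).2 hz

theorem toMarks_append (a b : List (Int × Int)) : toMarks (a ++ b) = toMarks a ++ toMarks b := by
  simp [toMarks]

theorem toMarks_cons (q : Int × Int) (s : List (Int × Int)) :
    toMarks (q :: s) =
      (if q.1 = 0 ∨ q.1 = -1 ∨ (0 < q.1 ∧ q.1 < 65535)
        then [(decide (0 < q.1 ∧ q.1 < 65535), q.2)] else []) ++ toMarks s := by
  by_cases h : q.1 = 0 ∨ q.1 = -1 ∨ (0 < q.1 ∧ q.1 < 65535) <;>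
    simp [toMarks, h]

theorem toMarks_enum (xs : List Int) (k c : Int) :
    toMarks ((PySem.List.enumerate xs k).map (fun p => (p.2, p.1 + c))) = marksOf xs (k + c) := by
  induction xs generalizing k with
  | nil => simp [PySem.List.enumerate_nil, toMarks, marksOf]
  | cons v r ih =>
    rw [PySem.List.enumerate_cons, List.map_cons, toMarks_cons, ih (k + 1),
        show k + 1 + c = k + c + 1 by ring]
    by_cases hv : 0 < v ∧ v < 65535
    · have hng : ¬ (v = 0 ∨ v = -1) := by omega
      simp only [marksOf, if_pos hv]
      simp [hv]
    · by_cases hg : v = 0 ∨ v = -1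
      · simp only [marksOf, if_neg hv, if_pos hg]
        have h1 : ¬ (0 < v ∧ v < 65535) := hv
        simp [hg, h1]
      · simp only [marksOf, if_neg hv, if_neg hg]
        simp [hv, hg]

theorem countP_zip_prevs (ms : List (Bool × Int)) (p : Bool) :
    (ms.zip (p :: ms.dropLast.map Prod.fst)).countP (fun x => x.1.1 && !x.2) = startsR ms p := by
  induction ms generalizing p with
  | nil => simp [startsR]
  | cons x r ih =>
    obtain ⟨h, j⟩ := x
    cases r with
    | nil => simp [startsR, List.countP_cons]
    | cons y r' =>
      rw [List.dropLast_cons₂, List.map_cons, List.zip_cons_cons, List.countP_cons, ih h]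
      simp only [startsR]
      omega

theorem A_eq_res (m1 m2 : List Int) :
    find_hit_in_layer m1 m2 =
      resOf (mLoop (marksOf m1 0 ++ (false, -1) :: marksOf m2 32) false false (-1)) := by
  have h1 := fhilLoopA_eq_mLoop m1 0 false false (-1) 0
  norm_num at h1
  unfold find_hit_in_layer
  rw [h1, mLoop_append]
  cases hr1 : mLoop (marksOf m1 0) false false (-1) with
  | none => rfl
  | some s =>
    obtain ⟨z, h, i⟩ := s
    dsimp only
    have h2 := fhilLoopA_eq_mLoop m2 0 true h i 32
    norm_num at h2
    rw [h2]
    show _ = resOf (mLoop ((false, -1) :: marksOf m2 32) z h i)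
    have hsent : mLoop ((false, (-1 : Int)) :: marksOf m2 32) z h i = mLoop (marksOf m2 32) true h i := rfl
    rw [hsent]
    cases mLoop (marksOf m2 32) true h i with
    | none => rfl
    | some s2 => obtain ⟨a, b, c⟩ := s2; rfl

theorem B_eq_res (m1 m2 : List Int) :
    find_hit_in_layer_alt m1 m2 =
      (if startsR (marksOf m1 0 ++ (false, -1) :: marksOf m2 32) false ≠ 1 then -1
       else lastHitD (marksOf m1 0 ++ (false, -1) :: marksOf m2 32) (-1)) := by
  have hs1 : toMarks ((PySem.List.enumerate m1).map (fun p => (p.2, p.1))) = marksOf m1 0 := by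
    have : (fun (p : Int × Int) => (p.2, p.1)) = (fun (p : Int × Int) => (p.2, p.1 + 0)) := by
      funext p; simp
    rw [this]
    simpa using toMarks_enum m1 0 0
  have hs2 : toMarks ((PySem.List.enumerate m2).map (fun p => (p.2, p.1 + 32))) = marksOf m2 32 := by
    simpa using toMarks_enum m2 0 32
  have hm : toMarks (((PySem.List.enumerate m1).map (fun p => (p.2, p.1)))
        ++ [((0 : Int), (-1 : Int))]
        ++ ((PySem.List.enumerate m2).map (fun p => (p.2, p.1 + 32))))
      = marksOf m1 0 ++ (false, -1) :: marksOf m2 32 := by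
    rw [toMarks_append, toMarks_append, hs1, hs2,
        show toMarks [((0 : Int), (-1 : Int))] = [(false, -1)] from by decide]
    simp
  show (fun marks =>
      if (marks.zip (false :: (marks.dropLast.map Prod.fst))).countP (fun x => x.1.1 && !x.2) ≠ 1
      then (-1 : Int)
      else ((marks.filter Prod.fst).map Prod.snd).getLast?.getD (-1))
      (toMarks (((PySem.List.enumerate m1).map (fun p => (p.2, p.1)))
        ++ [((0 : Int), (-1 : Int))]
        ++ ((PySem.List.enumerate m2).map (fun p => (p.2, p.1 + 32))))) = _
  rw [hm]
  simp only [countP_zip_prevs]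
  rw [lastHitD, List.getLastD_eq_getLast?]

-- ===== VERDICT (by name: the statement is the Claim_ definition above) =====
theorem find_hit_in_layer_spec : Claim_equal_find_hit_in_layer := by
  intro m1 m2 _
  unfold Spec_find_hit_in_layer
  rw [A_eq_res, B_eq_res]
  set M := marksOf m1 0 ++ (false, -1) :: marksOf m2 32 with hM
  rcases h0 : startsR M false with _ | n
  · obtain ⟨z, hz⟩ := (mLoop_fresh M false (-1)).1 h0
    rw [hz]
    simp [resOf]
  · cases n with
    | zero =>
      obtain ⟨z, hz⟩ := (mLoop_fresh M false (-1)).2.1 h0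
      rw [hz]
      simp [resOf]
    | succ k =>
      have hn := (mLoop_fresh M false (-1)).2.2 (by omega)
      rw [hn]
      simp [resOf]
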